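-- pv_equiv track=rewrite | github.com/bielovexmo-bit/polymarket-edge-bot | main.py | find_correlated_signal
-- ===== SOURCE A (Python) =====
-- CORRELATIONS = {
--     "bitcoin":  ["microstrategy", "coinbase", "crypto etf", "btc"],
--     "trump":    ["crypto bill", "sec chair", "defi", "executive order"],
--     "fed":      ["bitcoin ath", "gold", "nasdaq", "rate cut"],
--     "election": ["president", "senate", "congress", "poll"],
-- }
--
-- def find_correlated_signal(market_question: str, resolved_signals: list[str]) -> bool:
--     q = market_question.lower()
--     for resolved in resolved_signals:
--         for category, keywords in CORRELATIONS.items():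
--             if category in resolved.lower():
--                 if any(kw in q for kw in keywords):
--                     return True
--     return False
-- ===== SOURCE B (Python) =====
-- CORRELATIONS = {
--     "bitcoin":  ["microstrategy", "coinbase", "crypto etf", "btc"],
--     "trump":    ["crypto bill", "sec chair", "defi", "executive order"],
--     "fed":      ["bitcoin ath", "gold", "nasdaq", "rate cut"],
--     "election": ["president", "senate", "congress", "poll"],
-- }
--
-- def find_correlated_signal(market_question: str, resolved_signals: list[str]) -> bool:
--     q = market_question.lower()
--     # Phase 1: one pass over CORRELATIONS builds the active-category table.
--     active = [cat for cat, kws in CORRELATIONS.items() if any(kw in q for kw in kws)]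
--     # Phase 2: single scan over the signals against that table.
--     for sig in resolved_signals:
--         s = sig.lower()
--         if any(cat in s for cat in active):
--             return True
--     return False
-- ===== Notes on version B (the rewrite author's own statement) =====
-- stated objective: faster
-- what changed: Replaced A's interleaved double scan (re-testing every category's keywords against the question inside the per-signal loop) by a two-phase decomposition: one pass over CORRELATIONS builds the active-category list once, then a single scan over the signals checks only those active categories.
import Mathlib
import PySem

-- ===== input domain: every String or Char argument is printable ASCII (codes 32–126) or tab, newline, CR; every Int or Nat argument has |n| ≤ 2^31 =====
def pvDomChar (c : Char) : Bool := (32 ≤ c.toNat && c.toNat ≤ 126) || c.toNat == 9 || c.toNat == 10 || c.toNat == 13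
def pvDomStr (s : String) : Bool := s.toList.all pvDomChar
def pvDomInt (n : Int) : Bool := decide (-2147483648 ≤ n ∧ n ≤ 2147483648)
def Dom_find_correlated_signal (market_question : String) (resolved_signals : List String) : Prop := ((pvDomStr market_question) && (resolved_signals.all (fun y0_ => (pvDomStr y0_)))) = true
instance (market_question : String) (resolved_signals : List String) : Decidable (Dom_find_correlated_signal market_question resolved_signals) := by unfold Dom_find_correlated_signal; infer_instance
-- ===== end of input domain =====

-- B replaces A's interleaved double scan by a two-phase pass (build active categories, then scan signals); alternative decomposition, same result.

-- the module-level CORRELATIONS dict, in insertion order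
def CORRELATIONS : List (String × List String) :=
  [("bitcoin",  ["microstrategy", "coinbase", "crypto etf", "btc"]),
   ("trump",    ["crypto bill", "sec chair", "defi", "executive order"]),
   ("fed",      ["bitcoin ath", "gold", "nasdaq", "rate cut"]),
   ("election", ["president", "senate", "congress", "poll"])]

-- ===== PORT A =====
-- outer for-loop with early 'return True' over resolved_signals; inner loop over CORRELATIONS.items()
def find_correlated_signal (market_question : String) (resolved_signals : List String) : Bool :=
  let q := PySem.Str.lower market_question
  resolved_signals.any (fun resolved =>
    CORRELATIONS.any (fun ck =>
      PySem.Str.isIn ck.1 (PySem.Str.lower resolved) &&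
      ck.2.any (fun kw => PySem.Str.isIn kw q)))

-- ===== PORT B =====
-- phase 1: one pass over CORRELATIONS builds the active-category table
def activeCategories (q : String) : List String :=
  (CORRELATIONS.filter (fun ck => ck.2.any (fun kw => PySem.Str.isIn kw q))).map Prod.fst

-- phase 2: single scan over the signals against that table
def find_correlated_signal_alt (market_question : String) (resolved_signals : List String) : Bool :=
  let active := activeCategories (PySem.Str.lower market_question)
  resolved_signals.any (fun signal =>
    active.any (fun cat => PySem.Str.isIn cat (PySem.Str.lower signal)))

-- ===== PRECONDITION & SPEC =====
def Spec_find_correlated_signal (market_question : String) (resolved_signals : List String) (out : Bool) : Prop := out = find_correlated_signal_alt market_question resolved_signals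
instance (market_question : String) (resolved_signals : List String) (out : Bool) : Decidable (Spec_find_correlated_signal market_question resolved_signals out) := by unfold Spec_find_correlated_signal; infer_instance

-- ===== CLAIM (what is proved, stated in full; the proofs are below) =====
def Claim_equal_find_correlated_signal : Prop := ∀ (market_question : String) (resolved_signals : List String), Dom_find_correlated_signal market_question resolved_signals → Spec_find_correlated_signal market_question resolved_signals (find_correlated_signal market_question resolved_signals)

-- ===== LEMMAS AND PROOFS =====

-- any over the firsts of a filtered pair list = any over the whole list of the conjunction
theorem any_filter_map_fst {α β : Type} (l : List (α × β)) (f : α → Bool) (g : α × β → Bool) :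
    (((l.filter g).map Prod.fst).any f) = l.any (fun p => f p.1 && g p) := by
  induction l with
  | nil => rfl
  | cons a t ih =>
    by_cases h : g a = true <;>
      simp [h, ih]

-- ===== VERDICT (by name: the statement is the Claim_ definition above) =====
theorem find_correlated_signal_spec : Claim_equal_find_correlated_signal := by
  intro market_question resolved_signals _
  unfold Spec_find_correlated_signal find_correlated_signal find_correlated_signal_alt activeCategories
  simp only [any_filter_map_fst]
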